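-- pv_equiv track=rewrite | github.com/mixi-inc/datadog-aws-ec2-counter | checks.d/aws-ec2-count.py | __get_ondemand_instances
-- ===== SOURCE A (Python) =====
-- def __get_ondemand_instances(running_instances, reserved_instances):
--     instances = {}
--
--     for availability_zone in running_instances.keys():
--         instances[availability_zone] = {}
--         for instance_type in running_instances[availability_zone].keys():
--             if reserved_instances.get(availability_zone) and reserved_instances[availability_zone].get(instance_type):
--                 instances[availability_zone][instance_type] = running_instances[availability_zone][instance_type] - reserved_instances[availability_zone][instance_type]
--             else:
--                 instances[availability_zone][instance_type] = running_instances[availability_zone][instance_type]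
--
--     for availability_zone in reserved_instances.keys():
--         if not instances.get(availability_zone):
--             instances[availability_zone] = {}
--         for instance_type in reserved_instances[availability_zone].keys():
--             if (not running_instances.get(availability_zone)) or (not running_instances[availability_zone].get(instance_type)):
--                 instances[availability_zone][instance_type] = -1 * reserved_instances[availability_zone][instance_type]
--
--     return instances
-- ===== SOURCE B (Python) =====
-- def __get_ondemand_instances(running_instances, reserved_instances):
--     instances = {}
--     for az in {**running_instances, **reserved_instances}:
--         run = running_instances.get(az, {})
--         res = reserved_instances.get(az, {})
--         instances[az] = {t: run.get(t, 0) - res.get(t, 0)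
--                         for t in {**run, **res}}
--     return instances
-- ===== Notes on version B (the rewrite author's own statement) =====
-- stated objective: simpler
-- what changed: Replaces A's two sequential passes (running pass with truthiness-guarded subtraction, then a reserved cleanup pass that patches missing/zero entries) by one union-driven pass: for each az in the key union, build the inner dict in one comprehension as running.get(t,0) - reserved.get(t,0), which a short case analysis shows reproduces A's truthiness behaviour exactly.
import Mathlib
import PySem

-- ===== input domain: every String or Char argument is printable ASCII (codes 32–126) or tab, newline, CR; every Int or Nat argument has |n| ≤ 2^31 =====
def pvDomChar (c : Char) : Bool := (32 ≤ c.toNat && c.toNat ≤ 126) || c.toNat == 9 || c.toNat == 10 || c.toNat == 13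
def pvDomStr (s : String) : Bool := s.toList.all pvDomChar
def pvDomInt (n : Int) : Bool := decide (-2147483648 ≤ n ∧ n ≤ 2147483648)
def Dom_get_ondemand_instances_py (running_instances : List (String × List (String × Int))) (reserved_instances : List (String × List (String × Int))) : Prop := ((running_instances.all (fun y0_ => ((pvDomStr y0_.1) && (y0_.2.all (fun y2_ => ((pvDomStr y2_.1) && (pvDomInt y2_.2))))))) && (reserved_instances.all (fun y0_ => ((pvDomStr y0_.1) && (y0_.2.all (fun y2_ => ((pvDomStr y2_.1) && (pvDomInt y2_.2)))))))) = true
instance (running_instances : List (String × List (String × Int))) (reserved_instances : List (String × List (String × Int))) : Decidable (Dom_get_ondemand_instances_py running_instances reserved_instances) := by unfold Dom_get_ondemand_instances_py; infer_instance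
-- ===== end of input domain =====

-- B replaces A's two sequential passes (running pass, then reserved-cleanup pass) by a single
-- union-driven pass computing running.get(t,0) - reserved.get(t,0) per key; return value only,
-- neither version mutates its arguments. Objective: simpler.

-- ===== PORT A =====
-- shared input adaptation: the Python parameters are dicts of dicts; build them from the
-- association lists with Python's dict semantics
def pvToDicts (l : List (String × List (String × Int))) : PySem.Dict String (PySem.Dict String Int) :=
  PySem.Dict.ofList (l.map (fun p => (p.1, PySem.Dict.ofList p.2)))

-- Python truthiness of `d.get(k)` when the values are dicts resp. ints
def pvTruthyD (o : Option (PySem.Dict String Int)) : Bool :=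
  match o with
  | some d => d.size != 0
  | none => false

def pvTruthyI (o : Option Int) : Bool := o.getD 0 != 0

-- literal transliteration of __get_ondemand_instances; the indexings
-- running_instances[az][t] / reserved_instances[az][t] are ported with getD: they are only
-- reached when the key is present (loop variable resp. truthiness guard), so Python cannot raise
def get_ondemand_instances_py (running_instances : List (String × List (String × Int))) (reserved_instances : List (String × List (String × Int))) : List (String × List (String × Int)) :=
  (PySem.Dict.items
    ((pvToDicts reserved_instances).keys.foldl
      (fun inst az =>
        -- second loop body: optional `instances[availability_zone] = {}`, then the inner loop
        ((pvToDicts reserved_instances).getD az PySem.Dict.empty).keys.foldl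
          (fun inst t =>
            if !(pvTruthyD ((pvToDicts running_instances).get? az))
                || !(pvTruthyI (((pvToDicts running_instances).getD az PySem.Dict.empty).get? t)) then
              inst.modify az PySem.Dict.empty (fun d =>
                d.insert t (-1 * ((pvToDicts reserved_instances).getD az PySem.Dict.empty).getD t 0))
            else inst)
          (if pvTruthyD (inst.get? az) then inst else inst.insert az PySem.Dict.empty))
      -- first loop (over running_instances.keys()) builds the dict the second loop starts from
      ((pvToDicts running_instances).keys.foldl
        (fun inst az =>
          ((pvToDicts running_instances).getD az PySem.Dict.empty).keys.foldl
            (fun inst t =>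
              if pvTruthyD ((pvToDicts reserved_instances).get? az)
                  && pvTruthyI (((pvToDicts reserved_instances).getD az PySem.Dict.empty).get? t) then
                inst.modify az PySem.Dict.empty (fun d =>
                  d.insert t (((pvToDicts running_instances).getD az PySem.Dict.empty).getD t 0
                    - ((pvToDicts reserved_instances).getD az PySem.Dict.empty).getD t 0))
              else
                inst.modify az PySem.Dict.empty (fun d =>
                  d.insert t (((pvToDicts running_instances).getD az PySem.Dict.empty).getD t 0)))
            (inst.insert az PySem.Dict.empty))
        PySem.Dict.empty))).map (fun p => (p.1, p.2.items))

-- ===== PORT B =====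
-- one pass over the union of availability zones; per az one comprehension over the union of types
def get_ondemand_instances_py_alt (running_instances : List (String × List (String × Int))) (reserved_instances : List (String × List (String × Int))) : List (String × List (String × Int)) :=
  (PySem.Set.update (PySem.Set.ofList (pvToDicts running_instances).keys)
      (pvToDicts reserved_instances).keys).map (fun az =>
    (az, (PySem.Set.update
            (PySem.Set.ofList ((pvToDicts running_instances).getD az PySem.Dict.empty).keys)
            ((pvToDicts reserved_instances).getD az PySem.Dict.empty).keys).map (fun t =>
      (t, ((pvToDicts running_instances).getD az PySem.Dict.empty).getD t 0
            - ((pvToDicts reserved_instances).getD az PySem.Dict.empty).getD t 0))))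

-- ===== PRECONDITION & SPEC =====
def Spec_get_ondemand_instances_py (running_instances : List (String × List (String × Int))) (reserved_instances : List (String × List (String × Int))) (out : List (String × List (String × Int))) : Prop := out = get_ondemand_instances_py_alt running_instances reserved_instances
instance (running_instances : List (String × List (String × Int))) (reserved_instances : List (String × List (String × Int))) (out : List (String × List (String × Int))) : Decidable (Spec_get_ondemand_instances_py running_instances reserved_instances out) := by unfold Spec_get_ondemand_instances_py; infer_instance

-- ===== CLAIM (what is proved, stated in full; the proofs are below) =====
def Claim_equal_get_ondemand_instances_py : Prop := ∀ (running_instances : List (String × List (String × Int))) (reserved_instances : List (String × List (String × Int))), Dom_get_ondemand_instances_py running_instances reserved_instances → Spec_get_ondemand_instances_py running_instances reserved_instances (get_ondemand_instances_py running_instances reserved_instances)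

-- ===== LEMMAS AND PROOFS =====

abbrev pvOD := PySem.Dict String (PySem.Dict String Int)

-- A's first-pass value for type t, with the truthiness of reserved.get(az) already expressed
-- through the looked-up inner dict sd
def pvVal (rd sd : PySem.Dict String Int) (t : String) : Int :=
  if (sd.size != 0) && pvTruthyI (sd.get? t) then rd.getD t 0 - sd.getD t 0 else rd.getD t 0

-- A's second-pass overwrite condition, likewise expressed through rd
def pvC2 (rd : PySem.Dict String Int) (t : String) : Bool :=
  !(rd.size != 0) || !(pvTruthyI (rd.get? t))

-- inner dict produced by A's first pass for one az
def pvF (rd sd : PySem.Dict String Int) : PySem.Dict String Int :=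
  rd.keys.foldl (fun d t => d.insert t (pvVal rd sd t)) PySem.Dict.empty

-- effect of A's second pass on one az's inner dict
def pvG (rd sd : PySem.Dict String Int) (d : PySem.Dict String Int) : PySem.Dict String Int :=
  sd.keys.foldl (fun d t => if pvC2 rd t then d.insert t (-1 * sd.getD t 0) else d) d

def pvInner (rd sd : PySem.Dict String Int) : PySem.Dict String Int := pvG rd sd (pvF rd sd)

-- B's inner association list for one az
def pvBInner (rd sd : PySem.Dict String Int) : List (String × Int) :=
  (PySem.Set.update (PySem.Set.ofList rd.keys) sd.keys).map (fun t => (t, rd.getD t 0 - sd.getD t 0))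

lemma pv_truthyD_eq (m : pvOD) (az : String) :
    pvTruthyD (m.get? az) = ((m.getD az PySem.Dict.empty).size != 0) := by
  cases h : m.get? az with
  | none =>
      rw [PySem.Dict.getD_of_get?_eq_none _ _ h]
      simp [pvTruthyD, PySem.Dict.size_empty]
  | some d =>
      rw [PySem.Dict.getD_eq_get?_getD, h]
      simp [pvTruthyD]

lemma pv_truthyI_eq (d : PySem.Dict String Int) (t : String) :
    pvTruthyI (d.get? t) = (d.getD t 0 != 0) := by
  simp [pvTruthyI, PySem.Dict.getD_eq_get?_getD]

lemma pv_getD_ne_mem (rd : PySem.Dict String Int) (t : String) (h : rd.getD t 0 ≠ 0) :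
    t ∈ rd.keys := by
  by_contra hm
  rw [PySem.Dict.getD_eq_get?_getD, (PySem.Dict.get?_eq_none_iff_not_mem_keys rd t).mpr hm] at h
  simp at h

lemma pv_not_mem_getD (rd : PySem.Dict String Int) (t : String) (h : t ∉ rd.keys) :
    rd.getD t 0 = 0 := by
  rw [PySem.Dict.getD_eq_get?_getD, (PySem.Dict.get?_eq_none_iff_not_mem_keys rd t).mpr h]
  rfl

lemma pv_size_zero_getD (rd : PySem.Dict String Int) (h : rd.size = 0) (t : String) :
    rd.getD t 0 = 0 := by
  have hi : rd.items = [] := List.length_eq_zero_iff.mp h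
  rw [PySem.Dict.getD_eq_get?_getD]
  simp [PySem.Dict.get?, hi]

lemma pv_mem_size (sd : PySem.Dict String Int) (t : String) (h : t ∈ sd.keys) : sd.size ≠ 0 := by
  intro hs
  have hi : sd.items = [] := List.length_eq_zero_iff.mp hs
  simp [PySem.Dict.keys, hi] at h

-- value after a fold of inserts whose inserted values do not read the accumulator
lemma pv_getD_foldl_const {ν : Type} (w : String → ν) (E : ν) :
    ∀ (ks : List String) (d : PySem.Dict String ν) (j : String),
      (ks.foldl (fun d k => d.insert k (w k)) d).getD j E = if j ∈ ks then w j else d.getD j E := by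
  intro ks
  induction ks with
  | nil => intro d j; simp
  | cons k ks ih =>
      intro d j
      simp only [List.foldl_cons, ih, List.mem_cons]
      by_cases h : j ∈ ks
      · simp [h]
      · by_cases hk : j = k <;>
          simp [h, hk, PySem.Dict.getD_insert]

-- value after a fold of inserts that update each distinct key once from its current value
lemma pv_getD_foldl_read {ν : Type} (g : String → ν → ν) (E : ν) :
    ∀ (ks : List String), ks.Nodup → ∀ (d : PySem.Dict String ν) (j : String),
      (ks.foldl (fun d k => d.insert k (g k (d.getD k E))) d).getD j E
        = if j ∈ ks then g j (d.getD j E) else d.getD j E := by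
  intro ks
  induction ks with
  | nil => intro _ d j; simp
  | cons k ks ih =>
      intro hnd d j
      have hk : k ∉ ks := (List.nodup_cons.mp hnd).1
      have hks : ks.Nodup := (List.nodup_cons.mp hnd).2
      simp only [List.foldl_cons, ih hks, List.mem_cons]
      by_cases hj : j = k
      · subst hj
        simp [hk, PySem.Dict.getD_insert_self]
      · by_cases h : j ∈ ks <;> simp [h, hj, PySem.Dict.getD_insert]

-- inserting back the value already stored at a present key is a no-op
lemma pv_insert_getD_self {ν : Type} (d : PySem.Dict String ν) (k : String) (E : ν)
    (hc : d.contains k = true) (hn : d.keys.Nodup) : d.insert k (d.getD k E) = d := by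
  apply PySem.Dict.ext
  rw [PySem.Dict.items_insert_of_contains _ _ hc]
  conv_rhs => rw [← List.map_id d.items]
  apply List.map_congr_left
  intro p hp
  by_cases h : p.1 = k
  · have hm : (k, p.2) ∈ d.items := by rw [← h]; exact hp
    have hg := PySem.Dict.getD_of_mem_items d hm hn E
    rw [← h] at hg ⊢
    simp [hg]
  · simp [h]

-- a loop that conditionally rewrites only the value at key az commutes with that insert
lemma pv_collapse_if (az : String) (c : String → Bool)
    (h : String → PySem.Dict String Int → PySem.Dict String Int) :
    ∀ (ts : List String) (i : pvOD) (d : PySem.Dict String Int),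
      ts.foldl (fun i t => if c t then i.insert az (h t (i.getD az PySem.Dict.empty)) else i)
          (i.insert az d)
        = i.insert az (ts.foldl (fun d t => if c t then h t d else d) d) := by
  intro ts
  induction ts with
  | nil => intro i d; simp
  | cons t ts ih =>
      intro i d
      by_cases hc : c t
      · simp only [List.foldl_cons, hc, if_true, PySem.Dict.getD_insert_self,
          PySem.Dict.insert_insert_self]
        exact ih i (h t d)
      · simp only [List.foldl_cons, hc, if_false, Bool.false_eq_true]
        exact ih i d

lemma pv_collapse (az : String) (h : String → PySem.Dict String Int → PySem.Dict String Int) :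
    ∀ (ts : List String) (i : pvOD) (d : PySem.Dict String Int),
      ts.foldl (fun i t => i.insert az (h t (i.getD az PySem.Dict.empty))) (i.insert az d)
        = i.insert az (ts.foldl (fun d t => h t d) d) := by
  intro ts
  induction ts with
  | nil => intro i d; simp
  | cons t ts ih =>
      intro i d
      simp only [List.foldl_cons, PySem.Dict.getD_insert_self, PySem.Dict.insert_insert_self]
      exact ih i (h t d)

-- drop from an update the elements that are already members of the set
lemma pv_set_update_filter (c : String → Bool) :
    ∀ (l : List String) (s : PySem.Set String), (∀ x ∈ l, c x = false → x ∈ s) →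
      PySem.Set.update s (l.filter c) = PySem.Set.update s l := by
  intro l
  induction l with
  | nil => intro s _; simp
  | cons x xs ih =>
      intro s hs
      by_cases hc : c x
      · rw [List.filter_cons_of_pos hc, PySem.Set.update_cons, PySem.Set.update_cons]
        exact ih _ (fun y hy hcy => (PySem.Set.mem_add s x y).mpr (Or.inl (hs y (by simp [hy]) hcy)))
      · rw [List.filter_cons_of_neg (by simp [hc]), PySem.Set.update_cons]
        have hx : x ∈ s := hs x (by simp) (by simpa using hc)
        have : PySem.Set.add s x = s := by
          simp [PySem.Set.add, PySem.Set.contains, hx]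
        rw [this]
        exact ih _ (fun y hy hcy => hs y (by simp [hy]) hcy)

-- two fold bodies that agree on nodup-keyed dicts give equal folds
lemma pv_foldl_congr_nodup (b1 b2 : pvOD → String → pvOD)
    (h : ∀ i az, i.keys.Nodup → b1 i az = b2 i az)
    (hp : ∀ i az, i.keys.Nodup → (b2 i az).keys.Nodup) :
    ∀ (ks : List String) (i : pvOD), i.keys.Nodup → ks.foldl b1 i = ks.foldl b2 i := by
  intro ks
  induction ks with
  | nil => intro i _; rfl
  | cons k ks ih =>
      intro i hn
      simp only [List.foldl_cons]
      rw [h i k hn]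
      exact ih _ (hp i k hn)

-- the per-az inner equality: A's two passes on one az produce exactly B's comprehension
lemma pv_inner_eq (rd sd : PySem.Dict String Int) : (pvInner rd sd).items = pvBInner rd sd := by
  have hF_keys : (pvF rd sd).keys = PySem.Set.ofList rd.keys := by
    rw [pvF, PySem.Dict.keys_foldl_insert rd.keys (fun _ t => pvVal rd sd t) PySem.Dict.empty,
      PySem.Dict.keys_empty, PySem.Set.update_nil_left]
  have hG : pvInner rd sd
      = (sd.keys.filter (pvC2 rd)).foldl (fun d t => d.insert t (-1 * sd.getD t 0)) (pvF rd sd) := by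
    rw [pvInner, pvG, List.foldl_filter]
  have hkeys : (pvInner rd sd).keys = PySem.Set.update (PySem.Set.ofList rd.keys) sd.keys := by
    rw [hG, PySem.Dict.keys_foldl_insert _ (fun d t => -1 * sd.getD t 0) _, hF_keys]
    apply pv_set_update_filter
    intro t _ hc
    have h1 : rd.getD t 0 ≠ 0 := by
      simp only [pvC2, pv_truthyI_eq, Bool.or_eq_false_iff, Bool.not_eq_false'] at hc
      simpa using hc.2
    exact (PySem.Set.mem_ofList rd.keys t).mpr (pv_getD_ne_mem rd t h1)
  have hnd : (pvInner rd sd).keys.Nodup := by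
    rw [hG]
    apply PySem.Dict.nodup_keys_foldl_insert
    rw [hF_keys]
    exact PySem.Set.nodup_ofList rd.keys
  have hval : ∀ t, (pvInner rd sd).getD t 0 = rd.getD t 0 - sd.getD t 0 := by
    intro t
    rw [hG, pv_getD_foldl_const, pvF, pv_getD_foldl_const, PySem.Dict.getD_empty]
    by_cases hf : t ∈ sd.keys.filter (pvC2 rd)
    · have hc2 : pvC2 rd t = true := (List.mem_filter.mp hf).2
      have hrd : rd.getD t 0 = 0 := by
        rw [pvC2, pv_truthyI_eq] at hc2
        rcases Bool.or_eq_true_iff.mp hc2 with h | h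
        · exact pv_size_zero_getD rd (by simpa using h) t
        · simpa using h
      simp [hf, hrd]
    · simp only [hf, if_false]
      by_cases hr : t ∈ rd.keys
      · simp only [hr, if_true]
        rw [pvVal, pv_truthyI_eq]
        by_cases hsv : sd.getD t 0 = 0
        · simp [hsv]
        · -- reserved value nonzero: the first-pass guard fires (sd is nonempty)
          have hsz : sd.size ≠ 0 := pv_mem_size sd t (pv_getD_ne_mem sd t hsv)
          simp [hsv, hsz]
      · -- t comes only from sd, or from neither
        have hrd : rd.getD t 0 = 0 := pv_not_mem_getD rd t hr
        by_cases hs : t ∈ sd.keys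
        · -- then pvC2 holds (rd has no t), so t ∈ filter — contradiction with hf
          exfalso
          apply hf
          rw [List.mem_filter]
          refine ⟨hs, ?_⟩
          simp [pvC2, pv_truthyI_eq, hrd]
        · have hsd : sd.getD t 0 = 0 := pv_not_mem_getD sd t hs
          simp [hr, hrd, hsd]
  rw [PySem.Dict.items_eq_map_keys _ hnd 0, hkeys, pvBInner]
  apply List.map_congr_left
  intro t _
  rw [hval t]

-- the normalized phases: A's whole computation as clean insert-folds
lemma pv_phase1_eq (run res : pvOD) :
    run.keys.foldl (fun inst az =>
      (run.getD az PySem.Dict.empty).keys.foldl (fun inst t =>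
        if pvTruthyD (res.get? az)
            && pvTruthyI ((res.getD az PySem.Dict.empty).get? t) then
          inst.modify az PySem.Dict.empty (fun d =>
            d.insert t ((run.getD az PySem.Dict.empty).getD t 0
              - (res.getD az PySem.Dict.empty).getD t 0))
        else
          inst.modify az PySem.Dict.empty (fun d =>
            d.insert t ((run.getD az PySem.Dict.empty).getD t 0)))
        (inst.insert az PySem.Dict.empty))
      PySem.Dict.empty
    = run.keys.foldl (fun inst az =>
        inst.insert az (pvF (run.getD az PySem.Dict.empty) (res.getD az PySem.Dict.empty)))
        PySem.Dict.empty := by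
  have hb : (fun (inst : pvOD) az =>
      (run.getD az PySem.Dict.empty).keys.foldl (fun inst t =>
        if pvTruthyD (res.get? az)
            && pvTruthyI ((res.getD az PySem.Dict.empty).get? t) then
          inst.modify az PySem.Dict.empty (fun d =>
            d.insert t ((run.getD az PySem.Dict.empty).getD t 0
              - (res.getD az PySem.Dict.empty).getD t 0))
        else
          inst.modify az PySem.Dict.empty (fun d =>
            d.insert t ((run.getD az PySem.Dict.empty).getD t 0)))
        (inst.insert az PySem.Dict.empty))
      = fun inst az =>
        inst.insert az (pvF (run.getD az PySem.Dict.empty) (res.getD az PySem.Dict.empty)) := by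
    funext inst az
    have hstep : (fun (i : pvOD) t =>
        if pvTruthyD (res.get? az)
            && pvTruthyI ((res.getD az PySem.Dict.empty).get? t) then
          i.modify az PySem.Dict.empty (fun d =>
            d.insert t ((run.getD az PySem.Dict.empty).getD t 0
              - (res.getD az PySem.Dict.empty).getD t 0))
        else
          i.modify az PySem.Dict.empty (fun d =>
            d.insert t ((run.getD az PySem.Dict.empty).getD t 0)))
        = fun (i : pvOD) t =>
          i.insert az ((i.getD az PySem.Dict.empty).insert t
            (pvVal (run.getD az PySem.Dict.empty) (res.getD az PySem.Dict.empty) t)) := by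
      funext i t
      rw [pv_truthyD_eq]
      simp only [PySem.Dict.modify, pvVal]
      by_cases hC : ((res.getD az PySem.Dict.empty).size != 0)
          && pvTruthyI ((res.getD az PySem.Dict.empty).get? t)
      · simp [hC]
      · simp [hC]
    rw [hstep]
    exact pv_collapse az
      (fun t d => d.insert t (pvVal (run.getD az PySem.Dict.empty) (res.getD az PySem.Dict.empty) t))
      (run.getD az PySem.Dict.empty).keys inst PySem.Dict.empty
  rw [hb]

lemma pv_phase2_step (run res : pvOD) (i : pvOD) (az : String) (hn : i.keys.Nodup) :
    (res.getD az PySem.Dict.empty).keys.foldl (fun inst t =>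
        if !(pvTruthyD (run.get? az))
            || !(pvTruthyI ((run.getD az PySem.Dict.empty).get? t)) then
          inst.modify az PySem.Dict.empty (fun d =>
            d.insert t (-1 * (res.getD az PySem.Dict.empty).getD t 0))
        else inst)
      (if pvTruthyD (i.get? az) then i else i.insert az PySem.Dict.empty)
    = i.insert az (pvG (run.getD az PySem.Dict.empty) (res.getD az PySem.Dict.empty)
        (i.getD az PySem.Dict.empty)) := by
  have hstep : (fun (inst : pvOD) t =>
      if !(pvTruthyD (run.get? az))
          || !(pvTruthyI ((run.getD az PySem.Dict.empty).get? t)) then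
        inst.modify az PySem.Dict.empty (fun d =>
          d.insert t (-1 * (res.getD az PySem.Dict.empty).getD t 0))
      else inst)
      = fun (inst : pvOD) t =>
        if pvC2 (run.getD az PySem.Dict.empty) t then
          inst.insert az ((inst.getD az PySem.Dict.empty).insert t
            (-1 * (res.getD az PySem.Dict.empty).getD t 0))
        else inst := by
    funext inst t
    rw [pv_truthyD_eq]
    simp only [PySem.Dict.modify, pvC2]
    rfl
  rw [hstep]
  by_cases ht : pvTruthyD (i.get? az)
  · simp only [ht, if_true]
    have hc : i.contains az = true := by
      rw [PySem.Dict.contains_eq_isSome_get?]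
      cases h : i.get? az with
      | none => rw [h] at ht; simp [pvTruthyD] at ht
      | some d => rfl
    conv_lhs => rw [← pv_insert_getD_self i az PySem.Dict.empty hc hn]
    exact pv_collapse_if az (pvC2 (run.getD az PySem.Dict.empty))
      (fun t d => d.insert t (-1 * (res.getD az PySem.Dict.empty).getD t 0))
      (res.getD az PySem.Dict.empty).keys i (i.getD az PySem.Dict.empty)
  · simp only [ht, if_false, Bool.false_eq_true]
    rw [pv_collapse_if az (pvC2 (run.getD az PySem.Dict.empty))
      (fun t d => d.insert t (-1 * (res.getD az PySem.Dict.empty).getD t 0))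
      (res.getD az PySem.Dict.empty).keys i PySem.Dict.empty]
    have hE : i.getD az PySem.Dict.empty = PySem.Dict.empty := by
      cases h : i.get? az with
      | none => exact PySem.Dict.getD_of_get?_eq_none _ _ h
      | some d =>
          rw [PySem.Dict.getD_eq_get?_getD, h]
          rw [h] at ht
          simp only [pvTruthyD, bne_eq_false_iff_eq, Bool.not_eq_true] at ht
          have hsz : d.size = 0 := by simpa using ht
          have hi : d.items = [] := List.length_eq_zero_iff.mp hsz
          apply PySem.Dict.ext
          simpa using hi
    rw [hE]
    rfl

-- the whole equivalence
lemma pv_main (running_instances reserved_instances : List (String × List (String × Int))) :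
    get_ondemand_instances_py running_instances reserved_instances
      = get_ondemand_instances_py_alt running_instances reserved_instances := by
  unfold get_ondemand_instances_py get_ondemand_instances_py_alt
  rw [pv_phase1_eq (pvToDicts running_instances) (pvToDicts reserved_instances)]
  have hRn : (pvToDicts running_instances).keys.Nodup := by
    rw [pvToDicts]; exact PySem.Dict.nodup_keys_ofList _
  have hSn : (pvToDicts reserved_instances).keys.Nodup := by
    rw [pvToDicts]; exact PySem.Dict.nodup_keys_ofList _
  set run := pvToDicts running_instances
  set res := pvToDicts reserved_instances
  have h1n : (run.keys.foldl (fun inst az =>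
      inst.insert az (pvF (run.getD az PySem.Dict.empty) (res.getD az PySem.Dict.empty)))
      PySem.Dict.empty).keys.Nodup :=
    PySem.Dict.nodup_keys_foldl_insert _ _ _ PySem.Dict.nodup_keys_empty
  rw [pv_foldl_congr_nodup _
      (fun i az => i.insert az (pvG (run.getD az PySem.Dict.empty) (res.getD az PySem.Dict.empty)
        (i.getD az PySem.Dict.empty)))
      (fun i az hn => pv_phase2_step run res i az hn)
      (fun i az hn => PySem.Dict.nodup_keys_insert _ _ _ hn)
      res.keys _ h1n]
  have h2n : ((res.keys.foldl (fun i az =>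
      i.insert az (pvG (run.getD az PySem.Dict.empty) (res.getD az PySem.Dict.empty)
        (i.getD az PySem.Dict.empty)))
      (run.keys.foldl (fun inst az =>
        inst.insert az (pvF (run.getD az PySem.Dict.empty) (res.getD az PySem.Dict.empty)))
        PySem.Dict.empty))).keys.Nodup :=
    PySem.Dict.nodup_keys_foldl_insert _ _ _ h1n
  rw [PySem.Dict.items_eq_map_keys _ h2n PySem.Dict.empty, List.map_map]
  rw [PySem.Dict.keys_foldl_insert res.keys
      (fun i az => pvG (run.getD az PySem.Dict.empty) (res.getD az PySem.Dict.empty)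
        (i.getD az PySem.Dict.empty)) _,
    PySem.Dict.keys_foldl_insert run.keys
      (fun _ az => pvF (run.getD az PySem.Dict.empty) (res.getD az PySem.Dict.empty)) _,
    PySem.Dict.keys_empty, PySem.Set.update_nil_left]
  apply List.map_congr_left
  intro az _
  simp only [Function.comp]
  congr 1
  rw [pv_getD_foldl_read _ _ res.keys hSn, pv_getD_foldl_const]
  by_cases hres : az ∈ res.keys
  · by_cases hrun : az ∈ run.keys
    · simp only [hres, hrun, if_true]
      have h := pv_inner_eq (run.getD az PySem.Dict.empty) (res.getD az PySem.Dict.empty)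
      rwa [pvInner, pvBInner] at h
    · simp only [hres, hrun, if_true, if_false, PySem.Dict.getD_empty]
      have hrd : run.getD az PySem.Dict.empty = PySem.Dict.empty := by
        rw [PySem.Dict.getD_eq_get?_getD,
          (PySem.Dict.get?_eq_none_iff_not_mem_keys run az).mpr hrun]
        rfl
      have hpf : pvF (run.getD az PySem.Dict.empty) (res.getD az PySem.Dict.empty)
          = PySem.Dict.empty := by
        rw [pvF, hrd, PySem.Dict.keys_empty]
        rfl
      have h := pv_inner_eq (run.getD az PySem.Dict.empty) (res.getD az PySem.Dict.empty)
      rwa [pvInner, hpf, pvBInner] at h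
  · have hsd : res.getD az PySem.Dict.empty = PySem.Dict.empty := by
      rw [PySem.Dict.getD_eq_get?_getD,
        (PySem.Dict.get?_eq_none_iff_not_mem_keys res az).mpr hres]
      rfl
    simp only [hres, if_false]
    by_cases hrun : az ∈ run.keys
    · simp only [hrun, if_true]
      have hpg : pvG (run.getD az PySem.Dict.empty) (res.getD az PySem.Dict.empty)
          (pvF (run.getD az PySem.Dict.empty) (res.getD az PySem.Dict.empty))
          = pvF (run.getD az PySem.Dict.empty) (res.getD az PySem.Dict.empty) := by
        rw [pvG, hsd, PySem.Dict.keys_empty]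
        rfl
      have h := pv_inner_eq (run.getD az PySem.Dict.empty) (res.getD az PySem.Dict.empty)
      rwa [pvInner, hpg, pvBInner] at h
    · simp only [hrun, if_false, PySem.Dict.getD_empty]
      have hrd : run.getD az PySem.Dict.empty = PySem.Dict.empty := by
        rw [PySem.Dict.getD_eq_get?_getD,
          (PySem.Dict.get?_eq_none_iff_not_mem_keys run az).mpr hrun]
        rfl
      rw [hrd, hsd]
      rfl

-- ===== VERDICT (by name: the statement is the Claim_ definition above) =====
theorem get_ondemand_instances_py_spec : Claim_equal_get_ondemand_instances_py := by
  intro running_instances reserved_instances _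
  exact pv_main running_instances reserved_instances
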